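-- pv_equiv track=rewrite | github.com/Tjorriemorrie/trading | reinforcement/signals/features.py | getRewardsCycle
-- ===== SOURCE A (Python) =====
-- def getRewardsCycle(closes):
--     rewards = []
--     iMax = 5 * 4
--     for pos, close in enumerate(closes):
--
--         # get score for bull
--         bullHighestHigh = close
--         bullHighestHighIndex = 0
--         for i in range(iMax):
--             if pos + i >= len(closes):
--                 break
--             closeI = closes[pos + i]
--             if closeI > bullHighestHigh:
--                 bullHighestHigh = closeI
--                 bullHighestHighIndex = i
--
--         bullLowestLow = close
--         for i in range(bullHighestHighIndex):
--             closeI = closes[pos + i]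
--             bullLowestLow = min([bullLowestLow, closeI])
--
--         bullProfit = bullHighestHigh - close
--         bullProfitRel = bullProfit - (close - bullLowestLow)
--
--         # get score for bear
--         bearLowestLow = close
--         bearLowestLowIndex = 0
--         for i in range(iMax):
--             if pos + i >= len(closes):
--                 break
--             closeI = closes[pos + i]
--             if close < bearLowestLow:
--                 bearLowestLow = closeI
--                 bearLowestLowIndex = i
--
--         bearHighestHigh = close
--         for i in range(bearLowestLowIndex):
--             closeI = closes[pos + i]
--             bearHighestHigh = max([bearHighestHigh, closeI])
--
--         bearProfit = close - bearLowestLow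
--         bearProfitRel = bearProfit - (bearHighestHigh - close)
--
--         rewards.append(bullProfit if bullProfitRel > bearProfitRel else -bearProfit)
--
--     return rewards
-- ===== SOURCE B (Python) =====
-- def getRewardsCycle(closes):
--     n = len(closes)
--     rewards = []
--     for pos in range(n):
--         c = closes[pos]
--         hh = c          # best (highest) close seen so far in the window
--         ll = c          # prefix-minimum captured at the moment hh was set
--         runmin = c      # running minimum of the window prefix scanned so far
--         for i in range(min(20, n - pos)):
--             x = closes[pos + i]
--             if x > hh:
--                 hh = x
--                 ll = runmin
--             if x < runmin:
--                 runmin = x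
--         profit = hh - c
--         rewards.append(profit if profit - (c - ll) > 0 else 0)
--     return rewards
-- ===== Notes on version B (the rewrite author's own statement) =====
-- stated objective: simpler
-- what changed: B replaces A's staged passes (argmax scan with break, then a rescan of the prefix for its minimum, plus a provably dead bear block whose condition 'close < bearLowestLow' can never fire) by a single fused online pass per position that maintains a running prefix-minimum and captures it whenever a new maximum appears, so no index is ever stored and no prefix is rescanned.
import Mathlib
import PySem

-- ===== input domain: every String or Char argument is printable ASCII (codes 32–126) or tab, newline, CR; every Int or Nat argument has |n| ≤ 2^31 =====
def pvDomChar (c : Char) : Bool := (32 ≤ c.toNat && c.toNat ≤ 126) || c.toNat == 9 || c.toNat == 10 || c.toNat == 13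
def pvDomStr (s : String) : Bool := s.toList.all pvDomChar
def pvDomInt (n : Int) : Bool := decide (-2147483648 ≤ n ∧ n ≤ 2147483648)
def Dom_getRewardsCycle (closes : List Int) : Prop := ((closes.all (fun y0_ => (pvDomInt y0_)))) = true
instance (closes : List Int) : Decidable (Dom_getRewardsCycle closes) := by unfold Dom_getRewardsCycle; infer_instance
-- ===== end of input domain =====

-- B replaces A's staged window passes (argmax scan, rescan of the prefix for its minimum, dead bear block)
-- by a single fused pass per position that carries a running prefix-minimum and captures it at each new
-- maximum; objective: simpler.

-- ===== PORT A =====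
-- 'for i in range(iMax): if pos + i >= len(closes): break; …' — the bull argmax loop (iMax = 5 * 4 = 20)
def pvBullLoop (closes : List Int) (pos : Int) : List Int → Int × Int → Int × Int
  | [], st => st
  | i :: rest, st =>
    if pos + i ≥ (closes.length : Int) then st        -- break
    else
      let closeI := PySem.List.pyGetD closes (pos + i) 0   -- closes[pos+i]; guard keeps the index in range
      pvBullLoop closes pos rest (if closeI > st.1 then (closeI, i) else st)

-- the bear loop: same shape, condition 'close < bearLowestLow'
def pvBearLoop (closes : List Int) (pos close : Int) : List Int → Int × Int → Int × Int
  | [], st => st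
  | i :: rest, st =>
    if pos + i ≥ (closes.length : Int) then st        -- break
    else
      let closeI := PySem.List.pyGetD closes (pos + i) 0
      pvBearLoop closes pos close rest (if close < st.1 then (closeI, i) else st)

-- the body of 'for pos, close in enumerate(closes)'
def pvAStep (closes : List Int) (pc : Int × Int) : Int :=
  let pos := pc.1
  let close := pc.2
  let bull := pvBullLoop closes pos (PySem.List.pyRange 0 20 1) (close, 0)
  let bullHighestHigh := bull.1
  let bullHighestHighIndex := bull.2
  let bullLowestLow := (PySem.List.pyRange 0 bullHighestHighIndex 1).foldl
      (fun ll i => min ll (PySem.List.pyGetD closes (pos + i) 0)) close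
  let bullProfit := bullHighestHigh - close
  let bullProfitRel := bullProfit - (close - bullLowestLow)
  let bear := pvBearLoop closes pos close (PySem.List.pyRange 0 20 1) (close, 0)
  let bearLowestLow := bear.1
  let bearLowestLowIndex := bear.2
  let bearHighestHigh := (PySem.List.pyRange 0 bearLowestLowIndex 1).foldl
      (fun hh i => max hh (PySem.List.pyGetD closes (pos + i) 0)) close
  let bearProfit := close - bearLowestLow
  let bearProfitRel := bearProfit - (bearHighestHigh - close)
  if bullProfitRel > bearProfitRel then bullProfit else -bearProfit

def getRewardsCycle (closes : List Int) : List Int :=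
  (PySem.List.enumerate closes 0).foldl (fun rewards pc => rewards ++ [pvAStep closes pc]) []

-- ===== PORT B =====
-- body of B's inner loop: one fused step on the state (hh, ll, runmin)
def pvFusedStep (st : Int × Int × Int) (x : Int) : Int × Int × Int :=
  let hh := if x > st.1 then x else st.1               -- if x > hh: hh = x
  let ll := if x > st.1 then st.2.2 else st.2.1        --            ll = runmin
  let rm := if x < st.2.2 then x else st.2.2           -- if x < runmin: runmin = x
  (hh, ll, rm)

-- body of B's 'for pos in range(n)'
def pvBStep (closes : List Int) (pos : Int) : Int :=
  let c := PySem.List.pyGetD closes pos 0              -- closes[pos]; pos is in range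
  let st := (PySem.List.pyRange 0 (min 20 ((closes.length : Int) - pos)) 1).foldl
      (fun st i => pvFusedStep st (PySem.List.pyGetD closes (pos + i) 0)) (c, c, c)
  let profit := st.1 - c
  if profit - (c - st.2.1) > 0 then profit else 0

def getRewardsCycle_alt (closes : List Int) : List Int :=
  (PySem.List.pyRange 0 (closes.length : Int) 1).foldl (fun out pos => out ++ [pvBStep closes pos]) []

-- ===== PRECONDITION & SPEC =====
def Spec_getRewardsCycle (closes : List Int) (out : List Int) : Prop := out = getRewardsCycle_alt closes
instance (closes : List Int) (out : List Int) : Decidable (Spec_getRewardsCycle closes out) := by unfold Spec_getRewardsCycle; infer_instance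

-- ===== CLAIM (what is proved, stated in full; the proofs are below) =====
def Claim_equal_getRewardsCycle : Prop := ∀ (closes : List Int), Dom_getRewardsCycle closes → Spec_getRewardsCycle closes (getRewardsCycle closes)

-- ===== LEMMAS AND PROOFS =====

-- proof-side argmax fold over an enumerated list (first strict-max semantics, like A's bull loop)
def pvAmax : List (Int × Int) → Int × Int → Int × Int
  | [], st => st
  | p :: t, st => pvAmax t (if p.2 > st.1 then (p.2, p.1) else st)

-- A's bull loop over range(j,20) with break ≡ pvAmax over the enumerated 20-element window suffix
lemma pvBullLoop_eq_amax (closes : List Int) (pos : Nat) :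
    ∀ (d j : Nat), j + d = 20 → ∀ st,
      pvBullLoop closes (pos : Int) (PySem.List.pyRange (j : Int) 20 1) st
        = pvAmax (PySem.List.enumerate (((closes.drop pos).take 20).drop j) (j : Int)) st := by
  intro d
  induction d with
  | zero =>
      intro j hj st
      have hj' : j = 20 := by omega
      subst hj'
      rw [PySem.List.pyRange_one_eq_nil (by norm_num)]
      rw [List.drop_eq_nil_of_le (by simp)]
      rfl
  | succ d ih =>
      intro j hj st
      have hjlt : (j : Int) < 20 := by exact_mod_cast (by omega : j < 20)
      rw [PySem.List.pyRange_one_cons hjlt]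
      simp only [pvBullLoop]
      by_cases hbr : (pos : Int) + (j : Int) ≥ (closes.length : Int)
      · rw [if_pos hbr]
        have hlen : ((closes.drop pos).take 20).length ≤ j := by
          have : (closes.drop pos).length = closes.length - pos := List.length_drop ..
          have hpj : closes.length ≤ pos + j := by exact_mod_cast hbr
          simp only [List.length_take, this]
          omega
        rw [List.drop_eq_nil_of_le hlen]
        rfl
      · rw [if_neg hbr]
        have hpj : pos + j < closes.length := by
          have := not_le.mp hbr; exact_mod_cast (by push_cast; omega : ((pos + j : Nat) : Int) < (closes.length : Int))
        have hjw : j < ((closes.drop pos).take 20).length := by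
          simp only [List.length_take, List.length_drop]; omega
        rw [List.drop_eq_getElem_cons hjw, PySem.List.enumerate_cons]
        have hget : PySem.List.pyGetD closes ((pos : Int) + (j : Int)) 0
            = ((closes.drop pos).take 20)[j] := by
          have : ((pos : Int) + (j : Int)) = ((pos + j : Nat) : Int) := by push_cast; ring
          rw [this, PySem.List.pyGetD_natCast]
          rw [List.getElem_take, List.getElem_drop]
          exact List.getD_eq_getElem _ _ hpj
        simp only [pvAmax]
        rw [hget] at *
        have hrec := ih (j + 1) (by omega) (if ((closes.drop pos).take 20)[j] > st.1 then (((closes.drop pos).take 20)[j], (j : Int)) else st)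
        simp only [Nat.cast_add, Nat.cast_one] at hrec
        exact hrec

-- pvAmax computes (running max, index of its first occurrence), unless nothing beats the start
lemma pvAmax_spec :
    ∀ (xs : List Int) (j hh hi : Int),
      pvAmax (PySem.List.enumerate xs j) (hh, hi) =
        if xs.foldl max hh > hh
        then (xs.foldl max hh, j + (((PySem.List.index? xs (xs.foldl max hh)).getD 0 : Nat) : Int))
        else (hh, hi) := by
  intro xs
  induction xs with
  | nil => intro j hh hi; simp [pvAmax, PySem.List.enumerate]
  | cons x t ih =>
      intro j hh hi
      rw [PySem.List.enumerate_cons]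
      simp only [pvAmax]
      by_cases hx : x > hh
      · simp only [hx, if_pos]
        rw [ih]
        have hmax : max hh x = x := by omega
        have hge : x ≤ t.foldl max x := (PySem.List.le_foldl_max t x).1
        simp only [List.foldl_cons, hmax]
        by_cases hM : t.foldl max x > x
        · have hne : x ≠ t.foldl max x := by omega
          have hmem : t.foldl max x ∈ t := by
            rcases PySem.List.foldl_max_mem t x with h | h
            · omega
            · exact h
          obtain ⟨k, hk⟩ : ∃ k, PySem.List.index? t (t.foldl max x) = some k :=
            Option.isSome_iff_exists.mp ((PySem.List.index?_isSome_iff t _).mpr hmem)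
          rw [if_pos hM, if_pos (by omega : t.foldl max x > hh),
              PySem.List.index?_cons_of_ne t hne, hk]
          simp only [Option.map_some, Option.getD_some, Prod.mk.injEq, true_and]
          push_cast
          ring
        · have hEq : t.foldl max x = x := by omega
          rw [if_neg hM, if_pos (by omega : t.foldl max x > hh), hEq,
              PySem.List.index?_cons_self]
          simp
      · simp only [if_neg hx]
        rw [ih]
        have hmax : max hh x = hh := by omega
        simp only [List.foldl_cons, hmax]
        by_cases hM : t.foldl max hh > hh
        · have hne : x ≠ t.foldl max hh := by omega
          have hmem : t.foldl max hh ∈ t := by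
            rcases PySem.List.foldl_max_mem t hh with h | h
            · omega
            · exact h
          obtain ⟨k, hk⟩ : ∃ k, PySem.List.index? t (t.foldl max hh) = some k :=
            Option.isSome_iff_exists.mp ((PySem.List.index?_isSome_iff t _).mpr hmem)
          rw [if_pos hM, if_pos hM, PySem.List.index?_cons_of_ne t hne, hk]
          simp only [Option.map_some, Option.getD_some, Prod.mk.injEq, true_and]
          push_cast
          ring
        · rw [if_neg hM, if_neg hM]

-- a loop 'for i in range(k): … closes[pos+i]' is a fold over the window prefix (any accumulator type)
lemma pvRangeFold_eq_takeFold {σ : Type} (closes : List Int) (pos : Nat) (f : σ → Int → σ) (a : σ)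
    (w : List Int) (hw : w = (closes.drop pos).take 20) :
    ∀ (k : Nat), k ≤ w.length →
      (PySem.List.pyRange 0 (k : Int) 1).foldl
          (fun acc i => f acc (PySem.List.pyGetD closes ((pos : Int) + i) 0)) a
        = (w.take k).foldl f a := by
  intro k
  induction k with
  | zero => intro _; rw [PySem.List.pyRange_one_eq_nil (by norm_num)]; simp
  | succ k ih =>
      intro hk
      have hkw : k < w.length := by omega
      have h1 : ((k + 1 : Nat) : Int) = (k : Int) + 1 := by push_cast; ring
      rw [h1, PySem.List.pyRange_one_succ_right (by positivity), List.foldl_append, ih (by omega)]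
      rw [List.take_add_one, List.getElem?_eq_getElem hkw, List.foldl_append]
      have hpj : pos + k < closes.length := by
        have h2 : w.length ≤ closes.length - pos := by
          simp [hw, List.length_take, List.length_drop]
        omega
      have hget : PySem.List.pyGetD closes ((pos : Int) + (k : Int)) 0 = w[k] := by
        have h3 : ((pos : Int) + (k : Int)) = ((pos + k : Nat) : Int) := by push_cast; ring
        subst hw
        rw [h3, PySem.List.pyGetD_natCast, List.getElem_take, List.getElem_drop]
        exact List.getD_eq_getElem _ _ hpj
      simp [hget]

-- A's bear loop never updates its state: its condition 'close < close' is false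
lemma pvBearLoop_id (closes : List Int) (pos close hi : Int) :
    ∀ idxs, pvBearLoop closes pos close idxs (close, hi) = (close, hi) := by
  intro idxs
  induction idxs with
  | nil => rfl
  | cons i rest ih =>
      simp only [pvBearLoop]
      split
      · rfl
      · simpa using ih

-- the 'if x < a then x else a' update is a min
lemma pvIfMin (a b : Int) : (if b < a then b else a) = min a b := by
  split_ifs <;> omega

-- B's fused pass, characterised: final max, the prefix-min captured at its first occurrence, running min
lemma pvFused_char (xs : List Int) (c : Int) :
    xs.foldl pvFusedStep (c, c, c) =
      if xs.foldl max c > c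
      then (xs.foldl max c,
            (xs.take ((PySem.List.index? xs (xs.foldl max c)).getD 0)).foldl min c,
            xs.foldl min c)
      else (c, c, xs.foldl min c) := by
  induction xs using List.reverseRecOn with
  | nil => simp
  | append_singleton ys x ih =>
      have hcM : c ≤ ys.foldl max c := (PySem.List.le_foldl_max ys c).1
      rw [List.foldl_append, List.foldl_append, List.foldl_append, ih]
      simp only [List.foldl_cons, List.foldl_nil]
      by_cases hx : x > ys.foldl max c
      · -- x is a new strict maximum: it is fresh, sits at index ys.length, captures the running min
        have hnotmem : x ∉ ys := fun hmem =>
          absurd ((PySem.List.le_foldl_max ys c).2 x hmem) (by omega)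
        have hMx : max (ys.foldl max c) x = x := by omega
        have hidx : PySem.List.index? (ys ++ [x]) x = some ys.length :=
          PySem.List.index?_append_singleton_self ys x hnotmem
        have htake : (ys ++ [x]).take ys.length = ys := by
          simp
        by_cases hMc : ys.foldl max c > c
        · rw [if_pos hMc, if_pos (by omega : max (ys.foldl max c) x > c)]
          simp only [pvFusedStep, if_pos hx, hMx, hidx, Option.getD_some, htake]
          simp [pvIfMin]
        · have hEq : ys.foldl max c = c := by omega
          rw [if_neg hMc, if_pos (by omega : max (ys.foldl max c) x > c)]
          simp only [pvFusedStep]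
          rw [if_pos (by omega : x > c), if_pos (by omega : x > c), hMx, hidx]
          simp only [Option.getD_some, htake]
          simp [pvIfMin]
      · -- x does not beat the running max: hh and ll are unchanged, only the running min moves
        have hMx : max (ys.foldl max c) x = ys.foldl max c := by omega
        by_cases hMc : ys.foldl max c > c
        · have hmem : ys.foldl max c ∈ ys := by
            rcases PySem.List.foldl_max_mem ys c with h | h
            · omega
            · exact h
          obtain ⟨k, hk⟩ : ∃ k, PySem.List.index? ys (ys.foldl max c) = some k :=
            Option.isSome_iff_exists.mp ((PySem.List.index?_isSome_iff ys _).mpr hmem)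
          obtain ⟨hklt, -, -⟩ := PySem.List.getElem_of_index?_eq_some hk
          have hidx : PySem.List.index? (ys ++ [x]) (ys.foldl max c) = some k := by
            rw [PySem.List.index?_append_of_mem [x] hmem, hk]
          have htake : (ys ++ [x]).take k = ys.take k :=
            List.take_append_of_le_length (le_of_lt hklt)
          rw [if_pos hMc, if_pos (by omega : max (ys.foldl max c) x > c)]
          simp only [pvFusedStep, if_neg (by omega : ¬ x > ys.foldl max c), hMx, hk, hidx,
            Option.getD_some, htake]
          simp [pvIfMin]
        · have hEq : ys.foldl max c = c := by omega
          rw [if_neg hMc, if_neg (by omega : ¬ max (ys.foldl max c) x > c)]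
          simp only [pvFusedStep]
          rw [if_neg (by omega : ¬ x > c), if_neg (by omega : ¬ x > c)]
          simp [pvIfMin]

-- the two loop bodies agree at every position
lemma pvStep_eq (closes : List Int) (k : Nat) (hk : k < closes.length) :
    pvAStep closes ((k : Int), closes[k]) = pvBStep closes (k : Int) := by
  -- the 20-element window at position k, nonempty since k < len
  obtain ⟨c, t, hct⟩ : ∃ c t, (closes.drop k).take 20 = c :: t := by
    cases hw : (closes.drop k).take 20 with
    | nil =>
        have h0 : 0 < ((closes.drop k).take 20).length := by
          simp only [List.length_take, List.length_drop]; omega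
        rw [hw] at h0; simp at h0
    | cons c t => exact ⟨c, t, rfl⟩
  have hc : closes[k] = c := by
    have h0 : ((closes.drop k).take 20)[0]'(by rw [hct]; simp) = c := by
      simp [hct]
    rw [List.getElem_take, List.getElem_drop] at h0
    simpa using h0
  have hcD : PySem.List.pyGetD closes ((k : Int)) 0 = c := by
    rw [PySem.List.pyGetD_natCast, List.getD_eq_getElem _ _ hk, hc]
  -- the bull loop is the argmax fold over the window
  have hbull0 : pvBullLoop closes (k : Int) (PySem.List.pyRange 0 20 1) (closes[k], 0)
      = pvAmax (PySem.List.enumerate (c :: t) 0) (closes[k], 0) := by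
    have h := pvBullLoop_eq_amax closes k 20 0 rfl (closes[k], 0)
    simpa [hct] using h
  -- the final max of the window and its first index
  have hcM : c ≤ t.foldl max c := (PySem.List.le_foldl_max t c).1
  have hMmem : t.foldl max c ∈ c :: t := by
    rcases PySem.List.foldl_max_mem t c with h | h
    · rw [h]; exact List.mem_cons_self
    · exact List.mem_cons_of_mem _ h
  obtain ⟨Jn, hJ⟩ : ∃ Jn, PySem.List.index? (c :: t) (t.foldl max c) = some Jn :=
    Option.isSome_iff_exists.mp ((PySem.List.index?_isSome_iff _ _).mpr hMmem)
  obtain ⟨hJlt, -, -⟩ := PySem.List.getElem_of_index?_eq_some hJ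
  have hfold : (c :: t).foldl max c = t.foldl max c := by
    simp [List.foldl_cons]
  have hbull : pvBullLoop closes (k : Int) (PySem.List.pyRange 0 20 1) (closes[k], 0)
      = if t.foldl max c > c then (t.foldl max c, ((Jn : Nat) : Int)) else (c, 0) := by
    rw [hbull0, pvAmax_spec, hc, hfold, hJ]
    by_cases hMc : t.foldl max c > c
    · rw [if_pos hMc, if_pos hMc]; simp
    · rw [if_neg hMc, if_neg hMc]
  -- A's min loop over range(J) is a fold over the window prefix
  have hll : ∀ (J : Nat), J ≤ (c :: t).length →
      (PySem.List.pyRange 0 ((J : Nat) : Int) 1).foldl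
        (fun ll i => min ll (PySem.List.pyGetD closes ((k : Int) + i) 0)) closes[k]
      = ((c :: t).take J).foldl min closes[k] := fun J hJle =>
    pvRangeFold_eq_takeFold closes k min closes[k] (c :: t) hct.symm J hJle
  -- B's fused loop over range(min 20 (n-k)) is the fused fold over the whole window
  have hwlen : (c :: t).length = min 20 (closes.length - k) := by
    rw [← hct]; simp [List.length_take, List.length_drop, Nat.min_comm]
  have hbnd : (min 20 ((closes.length : Int) - (k : Int))) = (((c :: t).length : Nat) : Int) := by
    rw [hwlen]; push_cast; omega
  have hB : (PySem.List.pyRange 0 (min 20 ((closes.length : Int) - (k : Int))) 1).foldl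
        (fun st i => pvFusedStep st (PySem.List.pyGetD closes ((k : Int) + i) 0)) (c, c, c)
      = (c :: t).foldl pvFusedStep (c, c, c) := by
    rw [hbnd, pvRangeFold_eq_takeFold closes k pvFusedStep (c, c, c) (c :: t) hct.symm
          (c :: t).length le_rfl, List.take_length]
  -- now both bodies reduce to the same closed form
  simp only [pvAStep, pvBStep, hcD, hbull, hB, pvFused_char, hfold]
  rw [pvBearLoop_id]
  rw [PySem.List.pyRange_one_eq_nil (by norm_num : (0:Int) ≤ 0)]
  have hr0 : PySem.List.pyRange (0 : Int) 0 1 = [] := PySem.List.pyRange_one_eq_nil le_rfl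
  by_cases hMc : t.foldl max c > c
  · rw [if_pos hMc, if_pos hMc, hJ]
    have h1 := hll Jn (le_of_lt hJlt)
    rw [hc] at h1
    simp only [Option.getD_some]
    simp [hc, h1]
  · rw [if_neg hMc, if_neg hMc]
    simp [hc, hr0]

-- ===== VERDICT (by name: the statement is the Claim_ definition above) =====
theorem getRewardsCycle_spec : Claim_equal_getRewardsCycle := by
  intro closes _
  unfold Spec_getRewardsCycle getRewardsCycle getRewardsCycle_alt
  rw [PySem.List.foldl_append_singleton_eq_map (pvAStep closes),
      PySem.List.foldl_append_singleton_eq_map (pvBStep closes)]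
  simp only [List.nil_append]
  apply List.ext_getElem
  · simp [PySem.List.length_enumerate, PySem.List.length_pyRange_one]
  · intro i h1 h2
    have hi : i < closes.length := by
      simpa [PySem.List.length_enumerate] using h1
    rw [List.getElem_map, List.getElem_map, PySem.List.getElem_enumerate,
        PySem.List.getElem_pyRange_one]
    simpa using pvStep_eq closes i hi
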